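-- pv_equiv track=rewrite | github.com/teaguetomesh/dqva-and-circuit-cutting | cutqc/evaluator.py | mutate_measurement_basis
-- ===== SOURCE A (Python) =====
-- import itertools, copy
--
-- def mutate_measurement_basis(meas):
--     if all(x!='I' for x in meas):
--         return [meas]
--     else:
--         mutated_meas = []
--         for x in meas:
--             if x != 'I':
--                 mutated_meas.append([x])
--             else:
--                 mutated_meas.append(['I','Z'])
--         mutated_meas = list(itertools.product(*mutated_meas))
--         return mutated_meas
-- ===== SOURCE B (Python) =====
-- def mutate_measurement_basis(meas):
--     if all(x != 'I' for x in meas):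
--         return [meas]
--
--     def expand(i):
--         if i == len(meas):
--             return [()]
--         rest = expand(i + 1)
--         x = meas[i]
--         if x == 'I':
--             return [('I',) + t for t in rest] + [('Z',) + t for t in rest]
--         return [(x,) + t for t in rest]
--
--     return expand(0)
-- ===== Notes on version B (the rewrite author's own statement) =====
-- stated objective: alternative
-- what changed: Replaces the build-choice-lists-then-itertools.product pipeline with a single direct recursion over the string list that prepends 'I'/'Z' (or the fixed character) to the recursively expanded tail, dropping the itertools import and the intermediate per-position choice lists.
import Mathlib
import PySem

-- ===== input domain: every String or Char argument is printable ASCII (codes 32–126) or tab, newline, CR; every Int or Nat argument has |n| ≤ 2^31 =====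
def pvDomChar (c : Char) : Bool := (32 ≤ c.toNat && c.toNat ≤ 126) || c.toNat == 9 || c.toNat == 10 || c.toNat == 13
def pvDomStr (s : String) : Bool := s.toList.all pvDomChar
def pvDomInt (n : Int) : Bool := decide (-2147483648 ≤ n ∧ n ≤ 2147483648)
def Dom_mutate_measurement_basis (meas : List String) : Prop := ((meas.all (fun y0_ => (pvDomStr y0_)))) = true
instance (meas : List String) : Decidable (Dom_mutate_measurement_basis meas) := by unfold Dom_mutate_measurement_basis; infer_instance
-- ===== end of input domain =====

-- B replaces the choice-lists + itertools.product pipeline with one direct recursion over the list (alternative decomposition, same cost).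


-- ===== PORT A =====
-- product step of itertools.product over the built choice lists (left-slow / right-fast)
def pvProdStep (acc : List (List String)) (cs : List String) : List (List String) :=
  acc.flatMap (fun t => cs.map (fun c => t ++ [c]))

def mutate_measurement_basis (meas : List String) : List (List String) :=
  if meas.all (fun x => x != "I") then [meas]
  else
    let mutated_meas := meas.foldl (fun acc x =>
      if x != "I" then acc ++ [[x]] else acc ++ [["I", "Z"]]) []
    (mutated_meas.foldl pvProdStep [[]])

-- ===== PORT B =====
def pvExpand : List String → List (List String)
  | [] => [[]]
  | x :: rest =>
    let r := pvExpand rest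
    if x == "I" then r.map (fun t => "I" :: t) ++ r.map (fun t => "Z" :: t)
    else r.map (fun t => x :: t)

def mutate_measurement_basis_alt (meas : List String) : List (List String) :=
  if meas.all (fun x => x != "I") then [meas]
  else pvExpand meas

-- ===== PRECONDITION & SPEC =====
def Spec_mutate_measurement_basis (meas : List String) (out : List (List String)) : Prop := out = mutate_measurement_basis_alt meas
instance (meas : List String) (out : List (List String)) : Decidable (Spec_mutate_measurement_basis meas out) := by unfold Spec_mutate_measurement_basis; infer_instance

-- ===== CLAIM (what is proved, stated in full; the proofs are below) =====
def Claim_equal_mutate_measurement_basis : Prop := ∀ (meas : List String), Dom_mutate_measurement_basis meas → Spec_mutate_measurement_basis meas (mutate_measurement_basis meas)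

-- ===== LEMMAS AND PROOFS =====

-- ===== VERDICT (by name: the statement is the Claim_ definition above) =====

theorem pvFoldl_prodStep (L : List (List String)) (acc : List (List String)) :
    L.foldl pvProdStep acc = acc.flatMap (fun t => (L.foldr (fun cs r => cs.flatMap (fun c => r.map (fun u => c :: u))) [[]]).map (fun u => t ++ u)) := by
  induction L generalizing acc with
  | nil => simp
  | cons cs L ih =>
    simp only [List.foldl_cons, List.foldr_cons, ih, pvProdStep]
    simp [List.flatMap_assoc, List.map_map, Function.comp_def, List.flatMap_map, List.map_flatMap]

theorem pvFoldr_map_expand (m : List String) :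
    ((m.map (fun x => if x == "I" then ["I", "Z"] else [x])).foldr
      (fun cs r => cs.flatMap (fun c => r.map (fun u => c :: u))) [[]]) = pvExpand m := by
  induction m with
  | nil => rfl
  | cons x m ih =>
    simp only [List.map_cons, List.foldr_cons, ih]
    by_cases hx : x = "I" <;> simp [hx, pvExpand, List.flatMap]

theorem pvChoices_eq (meas : List String) :
    (meas.foldl (fun acc x => if x != "I" then acc ++ [[x]] else acc ++ [["I", "Z"]]) []).foldr
      (fun cs r => cs.flatMap (fun c => r.map (fun u => c :: u))) [[]] = pvExpand meas := by
  have h : ∀ (m : List String) (pre : List (List String)),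
      (m.foldl (fun acc x => if x != "I" then acc ++ [[x]] else acc ++ [["I", "Z"]]) pre) =
      pre ++ m.map (fun x => if x == "I" then ["I", "Z"] else [x]) := by
    intro m
    induction m with
    | nil => simp
    | cons x m ih =>
      intro pre
      rw [List.foldl_cons, ih]
      by_cases hx : x = "I" <;> simp [hx]
  rw [h meas [], List.nil_append, pvFoldr_map_expand]

theorem mutate_measurement_basis_spec : Claim_equal_mutate_measurement_basis := by
  intro meas _
  unfold Spec_mutate_measurement_basis mutate_measurement_basis mutate_measurement_basis_alt
  by_cases hg : meas.all (fun x => x != "I") = true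
  · simp [hg]
  · simp only [hg, Bool.false_eq_true, if_false]
    rw [pvFoldl_prodStep, pvChoices_eq]
    simp
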